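-- pv_equiv track=rewrite | github.com/R3b3c4G/Curso-Python-POO | Codewars/7_kyu/Palindromes_Here_and_There .py | convert_palindromes
-- ===== SOURCE A (Python) =====
-- def convert_palindromes(numbers: list[int])-> list[int]:
--     """
--     Esta función convierte una lista de números en una lista de 1's y 0's; 1 si el
--     número es palíndromo o 0 si no es palíndromo.
--     :param numbers: Lista de números enteros a evaluar.
--     :return: Lista de 1's y 0's dependiendo si cada número es palíndromo.
--     """
--     n_numbers = []  # Lista para 1's y 0's.
--     for num in numbers:
--         cadena_num = str(num)   # Convertir número de la lista a cadena.
--         valor = 1   # Asumir inicialmente que es palíndromo.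
--         longitud = len(cadena_num)   # Comparar dígitos desde los extremos hacia el centro.
--         for i in range(longitud // 2):
--             if cadena_num[i] != cadena_num[longitud - 1 - i]:
--                 valor = 0
--                 break
--         n_numbers.append(valor)
--     return n_numbers
-- ===== SOURCE B (Python) =====
-- def convert_palindromes(numbers: list[int]) -> list[int]:
--     """
--     Mark each number 1 if it is a palindrome, else 0, by reversing the
--     number arithmetically (no string conversion); negatives are never
--     palindromes (the '-' sign has no mirror).
--     """
--     out = []
--     for num in numbers:
--         if num < 0:
--             out.append(0)
--             continue
--         m, rev = num, 0
--         while m > 0: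
--             rev = rev * 10 + m % 10
--             m //= 10
--         out.append(1 if rev == num else 0)
--     return out
-- ===== Notes on version B (the rewrite author's own statement) =====
-- stated objective: alternative
-- what changed: B decides palindromicity arithmetically, building the reversed integer with a mod/div loop and comparing it to the original (negatives short-circuit to 0), instead of A's string conversion with a two-ended half-scan over the characters.
import Mathlib
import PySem

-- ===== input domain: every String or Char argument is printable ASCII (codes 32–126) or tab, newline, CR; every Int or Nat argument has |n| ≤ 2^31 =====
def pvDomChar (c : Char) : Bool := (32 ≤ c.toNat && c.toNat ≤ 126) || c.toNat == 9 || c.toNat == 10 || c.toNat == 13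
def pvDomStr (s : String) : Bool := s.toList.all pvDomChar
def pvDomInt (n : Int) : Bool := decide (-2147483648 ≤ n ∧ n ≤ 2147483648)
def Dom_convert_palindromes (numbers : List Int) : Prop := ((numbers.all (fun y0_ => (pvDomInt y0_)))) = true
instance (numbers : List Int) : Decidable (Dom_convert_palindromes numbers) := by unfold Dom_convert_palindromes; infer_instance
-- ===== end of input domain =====

-- B marks palindromes by reversing each number arithmetically (mod/div loop) instead of
-- A's string conversion with a two-ended character half-scan; same values, alternative algorithm.

-- ===== PORT A =====
-- inner `for i in range(longitud // 2)` with its break, as structural recursion over the range list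
def pvInnerA (cadena_num : String) (longitud : Int) : List Int → Int
  | [] => 1
  | i :: rest =>
      if PySem.Str.pyGet? cadena_num i ≠ PySem.Str.pyGet? cadena_num (longitud - 1 - i) then 0
      else pvInnerA cadena_num longitud rest

def convert_palindromes (numbers : List Int) : List Int :=
  numbers.foldl
    (fun n_numbers num =>
      let cadena_num := PySem.Int.toStr num
      let longitud : Int := PySem.Str.len cadena_num
      let valor := pvInnerA cadena_num longitud
        (PySem.List.pyRange 0 (PySem.Int.floordiv longitud 2) 1)
      n_numbers ++ [valor]) []

-- ===== PORT B =====
-- `while m > 0: rev = rev*10 + m%10; m //= 10`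
def pvRevB (m rev : Int) : Int :=
  if h : 0 < m then pvRevB (PySem.Int.floordiv m 10) (rev * 10 + PySem.Int.mod m 10)
  else rev
termination_by m.toNat
decreasing_by
  rw [PySem.Int.floordiv_eq_ediv_of_pos (by norm_num : (0:Int) < 10)]
  omega

def convert_palindromes_alt (numbers : List Int) : List Int :=
  numbers.map (fun num =>
    if num < 0 then 0
    else if pvRevB num 0 = num then 1 else 0)

-- ===== PRECONDITION & SPEC =====
def Spec_convert_palindromes (numbers : List Int) (out : List Int) : Prop := out = convert_palindromes_alt numbers
instance (numbers : List Int) (out : List Int) : Decidable (Spec_convert_palindromes numbers out) := by unfold Spec_convert_palindromes; infer_instance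

-- ===== CLAIM (what is proved, stated in full; the proofs are below) =====
def Claim_equal_convert_palindromes : Prop := ∀ (numbers : List Int), Dom_convert_palindromes numbers → Spec_convert_palindromes numbers (convert_palindromes numbers)

-- ===== LEMMAS AND PROOFS =====

-- `Nat.toDigitsCore` writes the decimal digits (most significant first) in front of the accumulator
lemma pvToDigitsCore_eq : ∀ (f n : Nat) (acc : List Char), n < f →
    Nat.toDigitsCore 10 f n acc =
      (if n = 0 then ['0'] else ((Nat.digits 10 n).map Nat.digitChar).reverse) ++ acc := by
  intro f
  induction f with
  | zero => intro n acc h; omega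
  | succ f ih =>
      intro n acc h
      simp only [Nat.toDigitsCore]
      by_cases h0 : n = 0
      · subst h0
        have hd0 : Nat.digitChar 0 = '0' := by decide
        norm_num [hd0]
      · by_cases h1 : n / 10 = 0
        · have hn10 : n < 10 := by omega
          have : Nat.digits 10 n = [n % 10] := by
            rw [Nat.digits_def' (by norm_num) (by omega)]
            simp [h1]
          simp [h1, h0, this]
        · rw [if_neg h1, ih (n / 10) _ (by omega), if_neg h1, if_neg h0]
          rw [Nat.digits_def' (by norm_num : (1:Nat) < 10) (by omega : 0 < n)]
          simp only [List.map_cons, List.reverse_cons, List.append_assoc, List.cons_append,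
            List.nil_append]

lemma pvToChars_nonneg (n : Int) (h : 0 ≤ n) :
    PySem.Int.toChars n =
      (if n = 0 then ['0'] else ((Nat.digits 10 n.toNat).map Nat.digitChar).reverse) := by
  simp only [PySem.Int.toChars, if_neg (by omega : ¬ n < 0), Nat.toDigits]
  rw [pvToDigitsCore_eq _ _ _ (by omega)]
  have : n = 0 ↔ n.toNat = 0 := by omega
  simp [this]

lemma pvToChars_neg (n : Int) (h : n < 0) :
    PySem.Int.toChars n = '-' :: ((Nat.digits 10 n.natAbs).map Nat.digitChar).reverse := by
  simp only [PySem.Int.toChars, if_pos h, Nat.toDigits]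
  rw [pvToDigitsCore_eq _ _ _ (by omega)]
  have : ¬ n.natAbs = 0 := by omega
  simp [this]

lemma pvDigitChar_ne_dash (d : Nat) (h : d < 10) : Nat.digitChar d ≠ '-' := by
  interval_cases d <;> decide

lemma pvDigitChar_inj (d e : Nat) (hd : d < 10) (he : e < 10) :
    Nat.digitChar d = Nat.digitChar e → d = e := by
  interval_cases d <;> interval_cases e <;> decide

lemma pvMap_digitChar_inj (l1 : List Nat) : ∀ (l2 : List Nat),
    (∀ d ∈ l1, d < 10) → (∀ d ∈ l2, d < 10) →
    l1.map Nat.digitChar = l2.map Nat.digitChar → l1 = l2 := by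
  induction l1 with
  | nil =>
      intro l2 _ _ h
      cases l2 with
      | nil => rfl
      | cons b t => simp at h
  | cons a t ih =>
      intro l2 h1 h2 h
      cases l2 with
      | nil => simp_all
      | cons b t2 =>
          simp only [List.map_cons, List.cons.injEq] at h
          have := pvDigitChar_inj a b (h1 a (by simp)) (h2 b (by simp)) h.1
          have := ih t2 (fun d hd => h1 d (by simp [hd])) (fun d hd => h2 d (by simp [hd])) h.2
          simp_all

-- a half-scan agreeing on the first ⌊L/2⌋ mirror pairs forces a full palindrome
lemma pvHalf_palindrome (cs : List Char)
    (h : ∀ j : Nat, j < cs.length / 2 → cs[j]? = cs[cs.length - 1 - j]?) :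
    cs.reverse = cs := by
  apply List.ext_getElem?
  intro j
  by_cases hj : j < cs.length
  · rw [List.getElem?_reverse hj]
    rcases Nat.lt_or_ge j (cs.length / 2) with hlt | hge
    · exact (h j hlt).symm
    · rcases Nat.lt_or_ge (cs.length - 1 - j) (cs.length / 2) with hlt' | hge'
      · have := h _ hlt'
        have heq : cs.length - 1 - (cs.length - 1 - j) = j := by omega
        rw [heq] at this
        exact this
      · have : cs.length - 1 - j = j := by omega
        rw [this]
  · rw [List.getElem?_eq_none (by simpa using Nat.le_of_not_lt hj),
        List.getElem?_eq_none (by omega)]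

-- characterisation of A's inner loop over the remaining range
lemma pvInnerA_spec (s : String) (cs : List Char) (hs : s.toList = cs) :
    ∀ (d k : Nat), d = cs.length / 2 - k → k ≤ cs.length / 2 →
    (∀ j : Nat, j < k → cs[j]? = cs[cs.length - 1 - j]?) →
    pvInnerA s (cs.length : Int) (PySem.List.pyRange (k : Int) ((cs.length / 2 : Nat) : Int) 1)
      = if cs.reverse = cs then 1 else 0 := by
  intro d
  induction d with
  | zero =>
      intro k hd hk hprev
      have hkk : k = cs.length / 2 := by omega
      subst hkk
      have : PySem.List.pyRange ((cs.length / 2 : Nat) : Int) ((cs.length / 2 : Nat) : Int) 1 = [] := by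
        rw [PySem.List.pyRange_one]
        simp
      rw [this]
      rw [if_pos (pvHalf_palindrome cs hprev)]
      rfl
  | succ d ih =>
      intro k hd hk hprev
      have hklt : k < cs.length / 2 := by omega
      have hL2 : 2 ≤ cs.length := by omega
      rw [PySem.List.pyRange_one_cons (by exact_mod_cast hklt)]
      show (if PySem.Str.pyGet? s (k : Int) ≠ PySem.Str.pyGet? s ((cs.length : Int) - 1 - (k : Int)) then 0
            else pvInnerA s (cs.length : Int) (PySem.List.pyRange ((k : Int) + 1) ((cs.length / 2 : Nat) : Int) 1)) = _
      have hcast : (cs.length : Int) - 1 - (k : Int) = ((cs.length - 1 - k : Nat) : Int) := by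
        omega
      have hg1 : PySem.Str.pyGet? s (k : Int) = cs[k]? := by
        rw [PySem.Str.pyGet?_natCast, hs]
      have hg2 : PySem.Str.pyGet? s ((cs.length : Int) - 1 - (k : Int)) = cs[cs.length - 1 - k]? := by
        rw [hcast, PySem.Str.pyGet?_natCast, hs]
      by_cases heq : cs[k]? = cs[cs.length - 1 - k]?
      · rw [if_neg (by rw [hg1, hg2]; simpa using heq)]
        have : ((k : Int) + 1) = ((k + 1 : Nat) : Int) := by omega
        rw [this]
        apply ih (k + 1) (by omega) (by omega)
        intro j hj
        rcases Nat.lt_or_ge j k with hj' | hj'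
        · exact hprev j hj'
        · have : j = k := by omega
          subst this; exact heq
      · rw [if_pos (by rw [hg1, hg2]; simpa using heq)]
        rw [if_neg]
        intro hpal
        apply heq
        have hk' : k < cs.length := by omega
        have := List.getElem?_reverse hk' (l := cs)
        rw [hpal] at this
        exact this

-- A's per-element value: 1 iff the decimal string is a palindrome
lemma pvElemA_eq (num : Int) :
    (pvInnerA (PySem.Int.toStr num) (PySem.Str.len (PySem.Int.toStr num))
      (PySem.List.pyRange 0 (PySem.Int.floordiv (PySem.Str.len (PySem.Int.toStr num)) 2) 1))
    = if (PySem.Int.toChars num).reverse = PySem.Int.toChars num then 1 else 0 := by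
  have hs : (PySem.Int.toStr num).toList = PySem.Int.toChars num := PySem.Int.toList_toStr num
  rw [PySem.Str.len_eq, hs]
  have hfd : PySem.Int.floordiv ((PySem.Int.toChars num).length : Int) 2
      = (((PySem.Int.toChars num).length / 2 : Nat) : Int) := by
    exact_mod_cast PySem.Int.floordiv_natCast (PySem.Int.toChars num).length 2
  rw [hfd]
  have h0 : (0 : Int) = ((0 : Nat) : Int) := rfl
  rw [h0]
  exact pvInnerA_spec (PySem.Int.toStr num) (PySem.Int.toChars num) hs _ 0 rfl (by omega)
    (by intro j hj; omega)

-- B's loop computes the digit-reversed value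
lemma pvRevB_eq (N : Nat) : ∀ rev : Int,
    pvRevB (N : Int) rev =
      (((Nat.ofDigits 10 (Nat.digits 10 N).reverse : Nat)) : Int)
        + rev * 10 ^ (Nat.digits 10 N).length := by
  induction N using Nat.strong_induction_on with
  | _ N ih =>
      intro rev
      rw [pvRevB]
      by_cases h : 0 < (N : Int)
      · rw [dif_pos h]
        have hN : 0 < N := by exact_mod_cast h
        have hfd : PySem.Int.floordiv (N : Int) 10 = ((N / 10 : Nat) : Int) :=
          PySem.Int.floordiv_natCast N 10
        have hmd : PySem.Int.mod (N : Int) 10 = ((N % 10 : Nat) : Int) :=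
          PySem.Int.mod_natCast N 10
        rw [hfd, hmd, ih (N / 10) (Nat.div_lt_self hN (by norm_num))]
        rw [Nat.digits_def' (by norm_num : (1:Nat) < 10) hN]
        simp only [List.reverse_cons, Nat.ofDigits_append, Nat.ofDigits_cons, Nat.ofDigits_nil,
          List.length_reverse, List.length_cons]
        push_cast
        ring
      · rw [dif_neg h]
        have hN : N = 0 := by omega
        subst hN
        simp

lemma pvOfDigits_lt (l : List Nat) (h : ∀ d ∈ l, d < 10) :
    Nat.ofDigits 10 l < 10 ^ l.length :=
  Nat.ofDigits_lt_base_pow_length (by norm_num) h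

-- the arithmetic reversal equals the number iff the digit list is a palindrome
lemma pvRev_eq_iff (N : Nat) :
    Nat.ofDigits 10 (Nat.digits 10 N).reverse = N ↔
      (Nat.digits 10 N).reverse = Nat.digits 10 N := by
  constructor
  · intro h
    by_cases hN : N = 0
    · subst hN; simp
    · have hpos : 0 < N := Nat.pos_of_ne_zero hN
      have hds : Nat.digits 10 N = N % 10 :: Nat.digits 10 (N / 10) :=
        Nat.digits_def' (by norm_num : (1:Nat) < 10) hpos
      have hrev : (Nat.digits 10 N).reverse
          = (Nat.digits 10 (N / 10)).reverse ++ [N % 10] := by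
        rw [hds, List.reverse_cons]
      by_cases hm : N % 10 = 0
      · -- trailing zero: the reversal is strictly smaller, contradiction
        exfalso
        rw [hrev, hm, Nat.ofDigits_append] at h
        simp only [Nat.ofDigits_cons, Nat.ofDigits_nil] at h
        have hlt : Nat.ofDigits 10 (Nat.digits 10 (N / 10)).reverse
            < 10 ^ (Nat.digits 10 (N / 10)).length := by
          have := pvOfDigits_lt (Nat.digits 10 (N / 10)).reverse (by
            intro d hd
            exact Nat.digits_lt_base (by norm_num) (List.mem_reverse.mp hd))
          simpa using this
        have hlen : (Nat.digits 10 N).length = (Nat.digits 10 (N / 10)).length + 1 := by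
          rw [hds]; rfl
        have hge : 10 ^ (Nat.digits 10 N).length ≤ 10 * N :=
          Nat.base_pow_length_digits_le 10 N (by norm_num) hN
        rw [hlen, pow_succ] at hge
        omega
      · -- no trailing zero: digits of the reversal are exactly the reversed digits
        have hdig := Nat.digits_ofDigits 10 (by norm_num)
          ((Nat.digits 10 (N / 10)).reverse ++ [N % 10])
          (by
            intro d hd
            rcases List.mem_append.mp hd with hd | hd
            · exact Nat.digits_lt_base (by norm_num) (List.mem_reverse.mp hd)
            · simp at hd; subst hd; exact Nat.mod_lt _ (by norm_num))
          (fun h' => by simpa using hm)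
        rw [← hrev] at hdig
        rw [h] at hdig
        exact hdig.symm
  · intro h
    rw [h, Nat.ofDigits_digits]

-- per-element equality of the two ports
lemma pvElem_eq (num : Int) :
    (pvInnerA (PySem.Int.toStr num) (PySem.Str.len (PySem.Int.toStr num))
      (PySem.List.pyRange 0 (PySem.Int.floordiv (PySem.Str.len (PySem.Int.toStr num)) 2) 1))
    = (if num < 0 then 0 else if pvRevB num 0 = num then 1 else 0) := by
  rw [pvElemA_eq]
  by_cases hneg : num < 0
  · rw [if_pos hneg]
    rw [pvToChars_neg num hneg]
    have hne : Nat.digits 10 num.natAbs ≠ [] :=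
      Nat.digits_ne_nil_iff_ne_zero.mpr (by omega)
    rw [if_neg]
    intro hpal
    rw [List.reverse_cons, List.reverse_reverse] at hpal
    obtain ⟨a, t, hcons⟩ : ∃ a t, Nat.digits 10 num.natAbs = a :: t := by
      cases h : Nat.digits 10 num.natAbs with
      | nil => exact absurd h hne
      | cons a t => exact ⟨a, t, rfl⟩
    rw [hcons] at hpal
    simp only [List.map_cons, List.cons_append, List.cons.injEq] at hpal
    exact pvDigitChar_ne_dash a
      (Nat.digits_lt_base (by norm_num) (by rw [hcons]; simp)) hpal.1
  · rw [if_neg hneg]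
    obtain ⟨N, rfl⟩ : ∃ N : Nat, num = (N : Int) := ⟨num.toNat, by omega⟩
    rw [pvRevB_eq N 0]
    simp only [zero_mul, add_zero]
    rw [pvToChars_nonneg _ (by positivity)]
    by_cases hz : N = 0
    · subst hz
      norm_num [Nat.ofDigits]
    · have hN0 : ¬((N : Int) = 0) := by exact_mod_cast hz
      rw [if_neg hN0]
      simp only [Int.toNat_natCast]
      have hdlt : ∀ d ∈ Nat.digits 10 N, d < 10 :=
        fun d hd => Nat.digits_lt_base (by norm_num) hd
      have hrev : (((Nat.ofDigits 10 (Nat.digits 10 N).reverse : Nat)) : Int) = (N : Int)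
          ↔ Nat.ofDigits 10 (Nat.digits 10 N).reverse = N := Nat.cast_inj
      by_cases hpal : (Nat.digits 10 N).reverse = Nat.digits 10 N
      · rw [if_pos, if_pos]
        · rw [hrev, pvRev_eq_iff]; exact hpal
        · rw [List.reverse_reverse]
          calc (Nat.digits 10 N).map Nat.digitChar
              = (Nat.digits 10 N).reverse.map Nat.digitChar := by rw [hpal]
            _ = ((Nat.digits 10 N).map Nat.digitChar).reverse := by rw [List.map_reverse]
      · rw [if_neg, if_neg]
        · rw [hrev, pvRev_eq_iff]; exact hpal
        · rw [List.reverse_reverse]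
          intro hc
          apply hpal
          apply pvMap_digitChar_inj (Nat.digits 10 N).reverse (Nat.digits 10 N)
            (fun d hd => hdlt d (List.mem_reverse.mp hd)) hdlt
          rw [List.map_reverse]
          exact hc.symm

lemma pvFoldl_append (l : List Int) (f : Int → Int) : ∀ (init : List Int),
    l.foldl (fun acc x => acc ++ [f x]) init = init ++ l.map f := by
  induction l with
  | nil => intro init; simp
  | cons a t ih => intro init; simp [ih]

-- ===== VERDICT (by name: the statement is the Claim_ definition above) =====
theorem convert_palindromes_spec : Claim_equal_convert_palindromes := by
  intro numbers _
  unfold Spec_convert_palindromes convert_palindromes convert_palindromes_alt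
  rw [pvFoldl_append numbers
    (fun num => pvInnerA (PySem.Int.toStr num) (PySem.Str.len (PySem.Int.toStr num))
      (PySem.List.pyRange 0 (PySem.Int.floordiv (PySem.Str.len (PySem.Int.toStr num)) 2) 1)) []]
  simp only [List.nil_append]
  apply List.map_congr_left
  intro num _
  exact pvElem_eq num
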